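-- pv_equiv track=rewrite | github.com/srcoulombe/etf_comparer | src/utils.py | get_contiguous_truthy_segments
-- ===== SOURCE A (Python) =====
-- from typing import Mapping, List, Tuple, Callable, Union, Iterable, Any
--
-- def get_contiguous_truthy_segments(enumerable_: List[bool]) -> List[Tuple[int,int]]:
--     """Returns a list of tuples of integers indicating the `(inclusive_starting_index, exclusive_stopping_index)`
--     of contiguous truthy segments in `enumerable` (the List[bool] version of `enumerable_`).
--
--     Parameters
--     ----------
--     enumerable_ : List[bool]
--         Iterable to process. Gets automatically converted to a List[bool] (not in-place).
--
--     Returns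
--     -------
--     List[Tuple[int,int]]
--         List of tuples of integers indicating the `(inclusive_starting_index, exclusive_stopping_index)`
--         of contiguous truthy segments in `enumerable` (the List[bool] version of `enumerable_`).
--
--     Examples
--     --------
--     >>> out = get_contiguous_truthy_segments([])
--     >>> assert out == []
--     >>> out = get_contiguous_truthy_segments([1])
--     >>> assert out == [(0,1)]
--     >>> out = get_contiguous_truthy_segments([1,1])
--     >>> assert out == [(0,2)]
--     >>> out = get_contiguous_truthy_segments([1,1,0])
--     >>> assert out == [(0,2)]
--     >>> out = get_contiguous_truthy_segments([0,1,0,1,1,1])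
--     >>> assert out == [(1,2),(3,6)]
--     >>> out = get_contiguous_truthy_segments([False, False,])
--     >>> assert out == []
--     """
--     enumerable = list(map(bool, enumerable_))
--     contigs: List[Tuple[int,int]] = []
--     inclusive_starting_index = 0
--     while inclusive_starting_index < len(enumerable):
--         if enumerable[inclusive_starting_index] is False:
--             inclusive_starting_index += 1
--         else:
--             stop_exc = inclusive_starting_index
--             while stop_exc < len(enumerable) and enumerable[stop_exc]:
--                 stop_exc += 1
--             contigs.append((inclusive_starting_index, stop_exc))
--             inclusive_starting_index = stop_exc
--     return contigs
-- ===== SOURCE B (Python) =====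
-- def get_contiguous_truthy_segments(enumerable_):
--     enumerable = list(map(bool, enumerable_))
--     contigs = []
--     prev = False
--     start = 0
--     for i, cur in enumerate(enumerable):
--         if cur and not prev:
--             start = i
--         elif prev and not cur:
--             contigs.append((start, i))
--         prev = cur
--     if prev:
--         contigs.append((start, len(enumerable)))
--     return contigs
-- ===== Notes on version B (the rewrite author's own statement) =====
-- stated objective: idiomatic
-- what changed: Replaced A's nested outer/inner while loops that consume each truthy run via index arithmetic with a single flat enumerate pass doing prev-vs-cur edge detection (record start on rising edge, emit segment on falling edge, close an open run after the loop).
import Mathlib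
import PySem

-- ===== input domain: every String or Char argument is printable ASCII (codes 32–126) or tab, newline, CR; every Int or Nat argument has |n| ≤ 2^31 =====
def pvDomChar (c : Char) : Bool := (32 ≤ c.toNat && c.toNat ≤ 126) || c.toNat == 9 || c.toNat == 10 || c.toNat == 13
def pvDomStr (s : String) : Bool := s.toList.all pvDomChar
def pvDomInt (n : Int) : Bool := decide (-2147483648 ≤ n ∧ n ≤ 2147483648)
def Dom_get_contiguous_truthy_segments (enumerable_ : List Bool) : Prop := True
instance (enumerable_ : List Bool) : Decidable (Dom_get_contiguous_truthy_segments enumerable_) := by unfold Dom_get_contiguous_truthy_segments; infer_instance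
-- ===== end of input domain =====

-- B replaces A's nested outer/inner while loops with one flat enumerate pass using
-- prev-vs-cur edge detection; same O(n) cost, proved to return the same value.

-- ===== PORT A =====
-- inner `while stop_exc < len(enumerable) and enumerable[stop_exc]: stop_exc += 1`
def pvRunEnd (xs : List Bool) (j : Nat) : Nat :=
  if h : j < xs.length then
    if xs[j] = true then pvRunEnd xs (j + 1) else j
  else j
termination_by xs.length - j
decreasing_by omega

-- needed by the termination proof of the outer loop below
theorem pvRunEnd_ge (xs : List Bool) (j : Nat) : j ≤ pvRunEnd xs j := by
  unfold pvRunEnd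
  split
  · split
    · have := pvRunEnd_ge xs (j + 1); omega
    · omega
  · omega
termination_by xs.length - j
decreasing_by omega

-- outer `while inclusive_starting_index < len(enumerable): …`
def pvLoopA (xs : List Bool) (i : Nat) (acc : List (Int × Int)) : List (Int × Int) :=
  if h : i < xs.length then
    if hf : xs[i] = false then
      pvLoopA xs (i + 1) acc
    else
      let s := pvRunEnd xs i
      pvLoopA xs s (acc ++ [((i : Int), (s : Int))])
  else acc
termination_by xs.length - i
decreasing_by
  · omega
  · have hs : i + 1 ≤ pvRunEnd xs i := by
      unfold pvRunEnd
      rw [dif_pos h, if_pos (by simpa using hf)]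
      exact pvRunEnd_ge xs (i + 1)
    omega

def get_contiguous_truthy_segments (enumerable_ : List Bool) : List (Int × Int) :=
  pvLoopA enumerable_ 0 []

-- ===== PORT B =====
-- Python's enumerate, starting at k
def pvEnumFrom (k : Nat) : List Bool → List (Nat × Bool)
  | [] => []
  | b :: t => (k, b) :: pvEnumFrom (k + 1) t

-- loop body: rising edge records start, falling edge emits a segment; prev := cur
def pvStepB (st : List (Int × Int) × Bool × Int) (p : Nat × Bool) :
    List (Int × Int) × Bool × Int :=
  if p.2 && !st.2.1 then (st.1, p.2, (p.1 : Int))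
  else if st.2.1 && !p.2 then (st.1 ++ [(st.2.2, (p.1 : Int))], p.2, st.2.2)
  else (st.1, p.2, st.2.2)

def get_contiguous_truthy_segments_alt (enumerable_ : List Bool) : List (Int × Int) :=
  let st := (pvEnumFrom 0 enumerable_).foldl pvStepB ([], false, 0)
  if st.2.1 then st.1 ++ [(st.2.2, (enumerable_.length : Int))] else st.1

-- ===== PRECONDITION & SPEC =====
def Spec_get_contiguous_truthy_segments (enumerable_ : List Bool) (out : List (Int × Int)) : Prop := out = get_contiguous_truthy_segments_alt enumerable_
instance (enumerable_ : List Bool) (out : List (Int × Int)) : Decidable (Spec_get_contiguous_truthy_segments enumerable_ out) := by unfold Spec_get_contiguous_truthy_segments; infer_instance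

-- ===== CLAIM (what is proved, stated in full; the proofs are below) =====
def Claim_equal_get_contiguous_truthy_segments : Prop := ∀ (enumerable_ : List Bool), Dom_get_contiguous_truthy_segments enumerable_ → Spec_get_contiguous_truthy_segments enumerable_ (get_contiguous_truthy_segments enumerable_)

-- ===== LEMMAS AND PROOFS =====

-- number of leading `true`s
def pvLead : List Bool → Nat
  | [] => 0
  | true :: t => 1 + pvLead t
  | false :: _ => 0

theorem pvLead_le (t : List Bool) : pvLead t ≤ t.length := by
  induction t with
  | nil => simp [pvLead]
  | cons b t ih => cases b <;> simp only [pvLead, List.length_cons] <;> omega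

-- reference description of the segment list, starting at index k
def pvSegs (k : Int) : List Bool → List (Int × Int)
  | [] => []
  | false :: t => pvSegs (k + 1) t
  | true :: t => (k, k + 1 + (pvLead t : Int)) :: pvSegs (k + 1 + (pvLead t : Int)) (t.drop (pvLead t))
termination_by t => t.length
decreasing_by
  · simp only [List.length_cons]; omega
  · have := pvLead_le t; simp only [List.length_cons, List.length_drop]; omega

theorem pvRunEnd_spec (xs : List Bool) (t : List Bool) :
    ∀ j, xs.drop j = t → pvRunEnd xs j = j + pvLead t ∧ xs.drop (pvRunEnd xs j) = t.drop (pvLead t) := by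
  induction t with
  | nil =>
    intro j h
    have hlen : xs.length ≤ j := by
      have := List.length_drop (l := xs) (i := j); rw [h] at this; simp at this; omega
    unfold pvRunEnd
    rw [dif_neg (by omega)]
    simp [pvLead, h]
  | cons b t ih =>
    intro j h
    have hj : j < xs.length := by
      have := List.length_drop (l := xs) (i := j); rw [h] at this; simp at this; omega
    have h2 := h
    rw [List.drop_eq_getElem_cons hj, List.cons.injEq] at h2
    obtain ⟨hget, hdrop⟩ := h2
    cases b with
    | true =>
      have step : pvRunEnd xs j = pvRunEnd xs (j + 1) := by
        conv_lhs => rw [pvRunEnd]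
        rw [dif_pos hj, if_pos hget]
      obtain ⟨h1, hd⟩ := ih (j + 1) hdrop
      refine ⟨?_, ?_⟩
      · rw [step, h1]; simp [pvLead]; omega
      · rw [step, hd, pvLead, Nat.add_comm, List.drop_succ_cons]
    | false =>
      have step : pvRunEnd xs j = j := by
        conv_lhs => rw [pvRunEnd]
        rw [dif_pos hj, if_neg (by simp [hget])]
      simp [step, pvLead, h]

theorem pvLoopA_eq (xs : List Bool) (t : List Bool) (i : Nat) (acc : List (Int × Int))
    (h : xs.drop i = t) : pvLoopA xs i acc = acc ++ pvSegs (i : Int) t := by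
  match t with
  | [] =>
    have hlen : xs.length ≤ i := by
      have := List.length_drop (l := xs) (i := i); rw [h] at this; simp at this; omega
    unfold pvLoopA
    rw [dif_neg (by omega)]
    simp [pvSegs]
  | false :: t' =>
    have hi : i < xs.length := by
      have := List.length_drop (l := xs) (i := i); rw [h] at this; simp at this; omega
    have h2 := h
    rw [List.drop_eq_getElem_cons hi, List.cons.injEq] at h2
    obtain ⟨hget, hdrop⟩ := h2
    unfold pvLoopA
    rw [dif_pos hi, dif_pos hget]
    rw [pvLoopA_eq xs t' (i + 1) acc hdrop]
    have hc : ((i + 1 : Nat) : Int) = (i : Int) + 1 := by push_cast; ring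
    rw [hc]
    simp [pvSegs]
  | true :: t' =>
    have hi : i < xs.length := by
      have := List.length_drop (l := xs) (i := i); rw [h] at this; simp at this; omega
    have h2 := h
    rw [List.drop_eq_getElem_cons hi, List.cons.injEq] at h2
    obtain ⟨hget, hdrop⟩ := h2
    obtain ⟨hre, hrd⟩ := pvRunEnd_spec xs (true :: t') i h
    have hlead : pvLead (true :: t') = 1 + pvLead t' := by simp [pvLead]
    have hdd : xs.drop (pvRunEnd xs i) = t'.drop (pvLead t') := by
      rw [hrd, hlead, Nat.add_comm, List.drop_succ_cons]
    unfold pvLoopA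
    rw [dif_pos hi, dif_neg (by simp [hget])]
    rw [pvLoopA_eq xs (t'.drop (pvLead t')) (pvRunEnd xs i) (acc ++ [((i : Int), (pvRunEnd xs i : Int))]) hdd]
    have hcast : ((pvRunEnd xs i : Nat) : Int) = (i : Int) + 1 + (pvLead t' : Int) := by
      rw [hre, hlead]; push_cast; ring
    rw [hcast]
    simp [pvSegs]
termination_by t.length
decreasing_by
  · simp only [List.length_cons]; omega
  · have := pvLead_le t'
    simp only [List.length_cons, List.length_drop]; omega

-- the closing `if prev: contigs.append((start, len))` of B
def pvFinish (st : List (Int × Int) × Bool × Int) (n : Int) : List (Int × Int) :=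
  if st.2.1 then st.1 ++ [(st.2.2, n)] else st.1

theorem pvFoldB_eq (t : List Bool) : ∀ (k : Nat) (acc : List (Int × Int)) (s0 s : Int),
    pvFinish ((pvEnumFrom k t).foldl pvStepB (acc, false, s0)) ((k : Int) + (t.length : Int)) = acc ++ pvSegs (k : Int) t
    ∧ pvFinish ((pvEnumFrom k t).foldl pvStepB (acc, true, s)) ((k : Int) + (t.length : Int)) = acc ++ ((s, (k : Int) + (pvLead t : Int)) :: pvSegs ((k : Int) + (pvLead t : Int)) (t.drop (pvLead t))) := by
  induction t with
  | nil =>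
    intro k acc s0 s
    simp [pvEnumFrom, pvFinish, pvSegs, pvLead]
  | cons b t ih =>
    intro k acc s0 s
    cases b with
    | false =>
      have e1 : pvStepB (acc, false, s0) (k, false) = (acc, false, s0) := by simp [pvStepB]
      have e2 : pvStepB (acc, true, s) (k, false) = (acc ++ [(s, (k : Int))], false, s) := by
        simp [pvStepB]
      constructor
      · simp only [pvEnumFrom, List.foldl_cons, e1]
        have := (ih (k + 1) acc s0 s).1
        simp only [List.length_cons]
        have harith : (k : Int) + ((t.length : Nat) + 1 : Nat) = ((k + 1 : Nat) : Int) + (t.length : Int) := by push_cast; ring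
        rw [harith, this]
        simp [pvSegs]
      · simp only [pvEnumFrom, List.foldl_cons, e2]
        have := (ih (k + 1) (acc ++ [(s, (k : Int))]) s s).1
        simp only [List.length_cons]
        have harith : (k : Int) + ((t.length : Nat) + 1 : Nat) = ((k + 1 : Nat) : Int) + (t.length : Int) := by push_cast; ring
        rw [harith, this]
        simp [pvLead, pvSegs]
    | true =>
      have e1 : pvStepB (acc, false, s0) (k, true) = (acc, true, (k : Int)) := by simp [pvStepB]
      have e2 : pvStepB (acc, true, s) (k, true) = (acc, true, s) := by simp [pvStepB]
      have harith : (k : Int) + (((t.length : Nat) + 1 : Nat) : Int) = ((k + 1 : Nat) : Int) + (t.length : Int) := by push_cast; ring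
      constructor
      · simp only [pvEnumFrom, List.foldl_cons, e1, List.length_cons]
        rw [harith, (ih (k + 1) acc 0 (k : Int)).2]
        simp only [pvSegs]
        have : ((k + 1 : Nat) : Int) + (pvLead t : Int) = (k : Int) + 1 + (pvLead t : Int) := by push_cast; ring
        rw [this]
      · simp only [pvEnumFrom, List.foldl_cons, e2, List.length_cons]
        rw [harith, (ih (k + 1) acc 0 s).2]
        simp only [pvLead]
        have h1 : ((k + 1 : Nat) : Int) + (pvLead t : Int) = (k : Int) + ((1 + pvLead t : Nat) : Int) := by push_cast; ring
        rw [h1]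
        have h2 : (true :: t).drop (1 + pvLead t) = t.drop (pvLead t) := by
          rw [Nat.add_comm, List.drop_succ_cons]
        rw [h2]

-- ===== VERDICT (by name: the statement is the Claim_ definition above) =====
theorem get_contiguous_truthy_segments_spec : Claim_equal_get_contiguous_truthy_segments := by
  intro xs _
  unfold Spec_get_contiguous_truthy_segments
  unfold get_contiguous_truthy_segments get_contiguous_truthy_segments_alt
  have hA := pvLoopA_eq xs xs 0 [] (by simp)
  have hB := (pvFoldB_eq xs 0 [] 0 0).1
  simp only [Nat.cast_zero, zero_add, List.nil_append] at hA hB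
  rw [hA, ← hB, pvFinish]
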